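-- pv_equiv track=rewrite | github.com/Ashiq-am/Path-of-Python | 3.Data Types/Arrays Set 1 and Set 2/Prefix/Find the maximum length of the prefix  Set-2/Find the maximum length of the prefix  Set-2.py | maxPrefixLen
-- ===== SOURCE A (Python) =====
-- def maxPrefixLen(arr, N):
--     # Stores the frequency of
--     # elements
--     a, b = {}, {}
--
--     # Stores the maximum length
--     # of the prefix satisfying
--     # the conditions
--     ans = 1
--
--     # Traverse the array arr[]
--     for i in range(N):
--
--         # Stores the count of
--         # current element
--         curr = 0 if (arr[i] not in a) else a[arr[i]]
--
--         # If curr is not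
--         # equal to 0
--         if (curr != 0):
--
--             # Decrement b[curr]
--             # by 1
--             b[curr] -= 1
--
--             # If b[curr] is 0
--             if (b[curr] == 0):
--                 # Remove b[curr]
--                 # from the b
--                 del b[curr]
--
--         # Update
--         a[arr[i]] = a.get(arr[i], 0) + 1
--         b[curr + 1] = b.get(curr + 1, 0) + 1
--
--         # If all elements in the
--         # prefix are same or if
--         # all elements have frequency
--         # 1
--         if (a[arr[i]] == i + 1 or
--                 (1 in b) and b[1] == i + 1):
--
--             # Update the value of ans
--             ans = max(ans, i + 1)
--
--         # Else if the size of b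
--         # is 2
--         elif (len(b) == 2):
--             p = list(b.keys())[0]
--             q = list(b.keys())[1]
--
--             freq1 = p
--             freq2 = q
--
--             count1 = b[p]
--             count2 = b[q]
--
--             # If difference between
--             # freq2 and freq1 is
--             # equal to 1 and if
--             # count2 is equal to 1
--             if (freq2 - freq1 == 1 and count2 == 1):
--
--                 # Update the value
--                 # of ans
--                 ans = max(ans, i + 1)
--
--             # If difference between
--             # freq1 and freq2 is
--             # equal to 1 and if
--             # count1 is equal to 1
--             elif (freq1 - freq2 == 1 and count1 == 1):
--
--                 # Update the value
--                 # of ans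
--                 ans = max(ans, i + 1)
--
--             # If freq2 and count2 is 1
--             # or freq1 and count1 is 1
--             if ((freq2 == 1 and count2 == 1) or
--                     (freq1 == 1 and count1 == 1)):
--                 # Update the value of
--                 # ans
--                 ans = max(ans, i + 1)
--
--     # Return ans
--     return ans
-- ===== SOURCE B (Python) =====
-- def maxPrefixLen(arr, N):
--     # Recompute-per-prefix: for each prefix, build its element counts, then the
--     # frequency-of-counts table, and test validity on the sorted count values.
--     ans = 1
--     for i in range(N):
--         pre = arr[:i + 1]
--         cnt = {}
--         for x in pre:
--             cnt[x] = cnt.get(x, 0) + 1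
--         freq = {}
--         for c in cnt.values():
--             freq[c] = freq.get(c, 0) + 1
--         ks = sorted(freq)
--         if len(ks) == 1:
--             if ks[0] == i + 1 or ks[0] == 1:
--                 ans = i + 1
--         elif len(ks) == 2:
--             if (ks[1] == ks[0] + 1 and freq[ks[1]] == 1) or \
--                     (ks[0] == 1 and freq[ks[0]] == 1):
--                 ans = i + 1
--     return ans
-- ===== Notes on version B (the rewrite author's own statement) =====
-- stated objective: simpler
-- what changed: Replaces A's incremental frequency-of-frequency bookkeeping (decrement/delete/insert on two dicts carried across iterations) with a stateless per-prefix recompute: each prefix's count table and frequency-of-counts table are rebuilt from scratch and validity is decided on the sorted frequency keys.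
import Mathlib
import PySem

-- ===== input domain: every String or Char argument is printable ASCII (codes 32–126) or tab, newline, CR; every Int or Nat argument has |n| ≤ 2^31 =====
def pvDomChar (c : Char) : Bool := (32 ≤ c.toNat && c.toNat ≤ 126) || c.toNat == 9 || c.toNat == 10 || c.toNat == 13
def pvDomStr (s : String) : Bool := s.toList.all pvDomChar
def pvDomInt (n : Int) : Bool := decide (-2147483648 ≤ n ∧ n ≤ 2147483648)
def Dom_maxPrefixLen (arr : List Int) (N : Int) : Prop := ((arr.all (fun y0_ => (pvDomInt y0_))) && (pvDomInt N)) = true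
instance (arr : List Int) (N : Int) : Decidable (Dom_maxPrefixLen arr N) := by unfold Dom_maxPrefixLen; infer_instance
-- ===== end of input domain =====

-- B replaces A's incremental two-dict frequency-of-frequency bookkeeping with a stateless
-- per-prefix recompute checked on the sorted frequency keys (simpler, not faster).

-- ===== PORT A =====
-- loop body of A (one iteration of `for i in range(N)`); state is (a, b, ans)
def pvStepA (arr : List Int) (st : PySem.Dict Int Int × PySem.Dict Int Int × Int) (i : Int) :
    PySem.Dict Int Int × PySem.Dict Int Int × Int :=
  let a := st.1
  let b := st.2.1
  let ans := st.2.2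
  let x := PySem.List.pyGetD arr i 0          -- arr[i]; i is in range for every input admitted by Pre_
  let curr : Int := if a.contains x then a.getD x 0 else 0   -- 0 if (arr[i] not in a) else a[arr[i]]
  let b :=
    if curr ≠ 0 then
      let b := b.insert curr (b.getD curr 0 - 1)   -- b[curr] -= 1 (key present whenever curr ≠ 0)
      if b.getD curr 0 = 0 then b.erase curr else b
    else b
  let a := a.insert x (a.getD x 0 + 1)
  let b := b.insert (curr + 1) (b.getD (curr + 1) 0 + 1)
  let ans :=
    if a.getD x 0 = i + 1 ∨ (b.contains 1 ∧ b.getD 1 0 = i + 1) then max ans (i + 1)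
    else if b.size = 2 then
      let p := PySem.List.pyGetD b.keys 0 0     -- list(b.keys())[0]
      let q := PySem.List.pyGetD b.keys 1 0     -- list(b.keys())[1]
      let count1 := b.getD p 0                  -- b[p] (key present)
      let count2 := b.getD q 0                  -- b[q]
      let ans :=
        if q - p = 1 ∧ count2 = 1 then max ans (i + 1)
        else if p - q = 1 ∧ count1 = 1 then max ans (i + 1)
        else ans
      if (q = 1 ∧ count2 = 1) ∨ (p = 1 ∧ count1 = 1) then max ans (i + 1) else ans
    else ans
  (a, b, ans)

def maxPrefixLen (arr : List Int) (N : Int) : Int :=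
  ((PySem.List.pyRange 0 N 1).foldl (pvStepA arr) (PySem.Dict.empty, PySem.Dict.empty, 1)).2.2

-- ===== PORT B =====
-- loop body of B (one iteration of `for i in range(N)`); state is ans
def pvStepB (arr : List Int) (ans : Int) (i : Int) : Int :=
  let pre : List Int := PySem.List.slice arr none (some (i + 1))                                -- arr[:i+1]
  let cnt : PySem.Dict Int Int := pre.foldl (fun d x => d.insert x (d.getD x 0 + 1)) PySem.Dict.empty     -- element counts
  let freq : PySem.Dict Int Int := cnt.values.foldl (fun d c => d.insert c (d.getD c 0 + 1)) PySem.Dict.empty  -- counts of counts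
  let ks : List Int := PySem.List.sorted freq.keys (fun k => k) false                           -- sorted(freq)
  if ks.length = 1 then
    if PySem.List.pyGetD ks 0 0 = i + 1 ∨ PySem.List.pyGetD ks 0 0 = 1 then i + 1 else ans
  else if ks.length = 2 then
    if (PySem.List.pyGetD ks 1 0 = PySem.List.pyGetD ks 0 0 + 1 ∧ freq.getD (PySem.List.pyGetD ks 1 0) 0 = 1)
        ∨ (PySem.List.pyGetD ks 0 0 = 1 ∧ freq.getD (PySem.List.pyGetD ks 0 0) 0 = 1) then i + 1 else ans
  else ans

def maxPrefixLen_alt (arr : List Int) (N : Int) : Int :=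
  (PySem.List.pyRange 0 N 1).foldl (pvStepB arr) 1

-- ===== PRECONDITION & SPEC =====
-- Pre_ excludes exactly the inputs where A raises IndexError (N exceeds the list length).
def Pre_maxPrefixLen (arr : List Int) (N : Int) : Prop := N ≤ (arr.length : Int)
instance (arr : List Int) (N : Int) : Decidable (Pre_maxPrefixLen arr N) := by unfold Pre_maxPrefixLen; infer_instance
def pvWitness_maxPrefixLen : List Int × Int := ([1, 2, 2], 3)

def Spec_maxPrefixLen (arr : List Int) (N : Int) (out : Int) : Prop := out = maxPrefixLen_alt arr N
instance (arr : List Int) (N : Int) (out : Int) : Decidable (Spec_maxPrefixLen arr N out) := by unfold Spec_maxPrefixLen; infer_instance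

-- ===== CLAIM (what is proved, stated in full; the proofs are below) =====
def Claim_equal_maxPrefixLen : Prop := ∀ (arr : List Int) (N : Int), Dom_maxPrefixLen arr N → Pre_maxPrefixLen arr N → Spec_maxPrefixLen arr N (maxPrefixLen arr N)
-- ===== LEMMAS AND PROOFS =====

-- number of distinct elements of l whose multiplicity in l is c
def pvMult (l : List Int) (c : Int) : Nat :=
  (PySem.Set.ofList l).countP (fun y => (l.count y : Int) == c)

theorem pvMult_ne_zero (l : List Int) (c : Int) :
    pvMult l c ≠ 0 ↔ ∃ y ∈ l, (l.count y : Int) = c := by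
  unfold pvMult
  rw [← Nat.pos_iff_ne_zero, List.countP_pos_iff]
  simp [PySem.Set.mem_ofList]

theorem pvMult_count_ne_zero {l : List Int} {y : Int} (hy : y ∈ l) :
    pvMult l ((l.count y : Int)) ≠ 0 := by
  rw [pvMult_ne_zero]; exact ⟨y, hy, rfl⟩

theorem pvMult_pos_of_ne_zero {l : List Int} {c : Int} (h : pvMult l c ≠ 0) : 1 ≤ c := by
  obtain ⟨y, hy, hc⟩ := (pvMult_ne_zero l c).1 h
  have := List.count_pos_iff.2 hy
  omega

-- countP of two predicates that agree off a single element of a Nodup list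
theorem pvCountP_swap {l : List Int} (hl : l.Nodup) {x : Int} (hx : x ∈ l) {p q : Int → Bool}
    (h : ∀ y ∈ l, y ≠ x → p y = q y) :
    l.countP p + (if q x then 1 else 0) = l.countP q + (if p x then 1 else 0) := by
  induction l with
  | nil => cases hx
  | cons a t ih =>
    rw [List.nodup_cons] at hl
    by_cases hxa : x = a
    · subst hxa
      have ht : t.countP p = t.countP q :=
        List.countP_congr (fun y hy => by
          rw [h y (List.mem_cons_of_mem _ hy) (fun hyx => hl.1 (hyx ▸ hy))])
      simp only [List.countP_cons, ht]
      split_ifs <;> omega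
    · have hxt : x ∈ t := by
        rcases List.mem_cons.1 hx with h' | h'
        · exact absurd h' hxa
        · exact h'
      have hpa : p a = q a := h a (by simp) (fun hax => hxa hax.symm)
      have key := ih hl.2 hxt (fun y hy hyx => h y (List.mem_cons_of_mem _ hy) hyx)
      simp only [List.countP_cons, hpa] at key ⊢
      omega


-- master counting lemma: appending x shifts one distinct element from frequency (count x) to (count x)+1
theorem pvMult_append (l : List Int) (x : Int) (c : Int) :
    pvMult (l ++ [x]) c + (if (l.count x : Int) = c ∧ x ∈ l then 1 else 0)
      = pvMult l c + (if (l.count x : Int) + 1 = c then 1 else 0) := by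
  have hcnt : ∀ y : Int, y ≠ x → (l ++ [x]).count y = l.count y := by
    intro y hy
    simp [List.count_append, hy.symm]
  have hcx : (l ++ [x]).count x = l.count x + 1 := by
    simp [List.count_append]
  by_cases hx : x ∈ l
  · unfold pvMult
    rw [PySem.Set.ofList_append_singleton, PySem.Set.add_of_mem ((PySem.Set.mem_ofList l x).2 hx)]
    have hsw := pvCountP_swap (PySem.Set.nodup_ofList l) ((PySem.Set.mem_ofList l x).2 hx)
      (p := fun y => ((l ++ [x]).count y : Int) == c) (q := fun y => (l.count y : Int) == c)
      (fun y _ hyx => by simp [hcnt y hyx])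
    simp only [beq_iff_eq] at hsw
    rw [hcx] at hsw
    simp only [hx, and_true]
    push_cast at hsw ⊢
    omega
  · unfold pvMult
    rw [PySem.Set.ofList_append_singleton,
      PySem.Set.add_of_not_mem (fun hmem => hx ((PySem.Set.mem_ofList l x).1 hmem)),
      List.countP_append]
    have hS : (PySem.Set.ofList l).countP (fun y => ((l ++ [x]).count y : Int) == c)
        = (PySem.Set.ofList l).countP (fun y => (l.count y : Int) == c) :=
      List.countP_congr (fun y hy => by
        simp [hcnt y (fun h => hx (h ▸ (PySem.Set.mem_ofList l y).1 hy))])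
    rw [hS]
    have hc0 : l.count x = 0 := List.count_eq_zero_of_not_mem hx
    simp only [List.countP_cons, List.countP_nil, beq_iff_eq, hcx, hc0, hx, and_false]
    push_cast
    omega

theorem pvMult_append_other (l : List Int) (x : Int) (c : Int)
    (hc1 : c ≠ (l.count x : Int)) (hc2 : c ≠ (l.count x : Int) + 1) :
    pvMult (l ++ [x]) c = pvMult l c := by
  have h := pvMult_append l x c
  rw [if_neg (fun hh => hc1 hh.1.symm), if_neg (fun hh => hc2 hh.symm)] at h
  omega

theorem pvMult_append_curr (l : List Int) (x : Int) (hx : x ∈ l) :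
    pvMult l ((l.count x : Int)) = pvMult (l ++ [x]) ((l.count x : Int)) + 1 := by
  have h := pvMult_append l x ((l.count x : Int))
  rw [if_pos ⟨rfl, hx⟩, if_neg (by omega : ¬((l.count x : Int) + 1 = (l.count x : Int)))] at h
  omega

theorem pvMult_append_succ (l : List Int) (x : Int) :
    pvMult (l ++ [x]) ((l.count x : Int) + 1) = pvMult l ((l.count x : Int) + 1) + 1 := by
  have h := pvMult_append l x ((l.count x : Int) + 1)
  rw [if_neg (by rintro ⟨hh, -⟩; omega : ¬((l.count x : Int) = (l.count x : Int) + 1 ∧ x ∈ l)),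
    if_pos rfl] at h
  omega

-- all-equal prefixes: count of the last element equals the length iff length is a frequency
theorem pvMult_len {l : List Int} {x : Int} (hx : x ∈ l) :
    (l.count x : Int) = (l.length : Int) ↔ pvMult l ((l.length : Int)) ≠ 0 := by
  constructor
  · intro h; exact h ▸ pvMult_count_ne_zero hx
  · intro h
    obtain ⟨y, hy, hc⟩ := (pvMult_ne_zero _ _).1 h
    have hcy : l.count y = l.length := by exact_mod_cast hc
    have hall := List.count_eq_length.1 hcy
    have : y = x := hall x hx
    subst this; exact hc

theorem pvMult_len_unique {l : List Int} (h : pvMult l ((l.length : Int)) ≠ 0) :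
    ∀ c, pvMult l c ≠ 0 → c = (l.length : Int) := by
  obtain ⟨y, hy, hc⟩ := (pvMult_ne_zero _ _).1 h
  have hcy : l.count y = l.length := by exact_mod_cast hc
  have hall := List.count_eq_length.1 hcy
  intro c hcne
  obtain ⟨z, hz, hcz⟩ := (pvMult_ne_zero _ _).1 hcne
  have : y = z := hall z hz
  subst this; omega

-- all-distinct prefixes
theorem pvMult_one_eq_len {l : List Int} :
    (pvMult l 1 : Int) = (l.length : Int) ↔ ∀ c, pvMult l c ≠ 0 → c = 1 := by
  constructor
  · intro h c hc
    have hle1 : pvMult l 1 ≤ (PySem.Set.ofList l).length := List.countP_le_length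
    have hle2 : (PySem.Set.ofList l).length ≤ l.length := PySem.Set.length_ofList_le l
    have hm : pvMult l 1 = l.length := by exact_mod_cast h
    have heq : pvMult l 1 = (PySem.Set.ofList l).length := by omega
    have hall : ∀ y ∈ PySem.Set.ofList l, ((l.count y : Int) == 1) = true :=
      List.countP_eq_length.1 heq
    obtain ⟨z, hz, hcz⟩ := (pvMult_ne_zero _ _).1 hc
    have := hall z ((PySem.Set.mem_ofList l z).2 hz)
    rw [beq_iff_eq] at this
    omega
  · intro h
    have hone : ∀ y ∈ l, l.count y = 1 := by
      intro y hy
      have := h _ (pvMult_count_ne_zero hy)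
      omega
    have hnd : l.Nodup := List.nodup_iff_count_le_one.2 (fun a => by
      by_cases ha : a ∈ l
      · exact (hone a ha).le
      · simp [List.count_eq_zero_of_not_mem ha])
    unfold pvMult
    rw [PySem.Set.ofList_eq_self_of_nodup l hnd]
    have : l.countP (fun y => (l.count y : Int) == 1) = l.length :=
      List.countP_eq_length.2 (fun y hy => by simp [hone y hy])
    rw [this]

-- erase on Int-keyed dicts
theorem pvGet?_erase (d : PySem.Dict Int Int) (k c : Int) :
    (d.erase k).get? c = if c = k then none else d.get? c := by
  obtain ⟨items⟩ := d
  simp only [PySem.Dict.erase, PySem.Dict.get?]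
  induction items with
  | nil => simp
  | cons p t ih =>
    by_cases hpk : p.1 = k
    · rw [List.filter_cons_of_neg (by simp [hpk])]
      rw [ih]
      by_cases hck : c = k
      · simp [hck]
      · rw [if_neg hck, if_neg hck, List.find?_cons_of_neg (by simp [hpk]; exact fun h => hck h.symm)]
    · rw [List.filter_cons_of_pos (by simp [hpk])]
      by_cases hpc : p.1 = c
      · rw [List.find?_cons_of_pos (by simp [hpc]), List.find?_cons_of_pos (by simp [hpc]),
          if_neg (fun h => hpk (hpc.trans h))]
      · rw [List.find?_cons_of_neg (by simp [hpc]), List.find?_cons_of_neg (by simp [hpc])]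
        exact ih

theorem pvKeys_erase (d : PySem.Dict Int Int) (k : Int) :
    (d.erase k).keys = d.keys.filter (fun y => !(y == k)) := by
  obtain ⟨items⟩ := d
  simp only [PySem.Dict.erase, PySem.Dict.keys]
  induction items with
  | nil => simp
  | cons p t ih =>
    by_cases hpk : p.1 = k
    · rw [List.filter_cons_of_neg (by simp [hpk]), List.map_cons,
        List.filter_cons_of_neg (by simp [hpk]), ih]
    · rw [List.filter_cons_of_pos (by simp [hpk]), List.map_cons, List.map_cons,
        List.filter_cons_of_pos (by simp [hpk]), ih]

theorem pvSize_eq_keys_length (d : PySem.Dict Int Int) : d.size = d.keys.length :=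
  (d.items.length_map _).symm

-- the invariant carried by A's loop
def pvInv (pre : List Int) (a b : PySem.Dict Int Int) : Prop :=
  (∀ y, a.get? y = if pre.count y = 0 then none else some ((pre.count y : Int))) ∧
  (∀ c, b.get? c = if pvMult pre c = 0 then none else some ((pvMult pre c : Int))) ∧
  b.keys.Nodup

-- derived dict facts from the get?-characterisation
theorem pvDict_getD {pre : List Int} {b : PySem.Dict Int Int}
    (hb : ∀ c, b.get? c = if pvMult pre c = 0 then none else some ((pvMult pre c : Int))) (c : Int) :
    b.getD c 0 = (pvMult pre c : Int) := by
  rw [PySem.Dict.getD_eq_get?_getD, hb]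
  split_ifs with h
  · simp [h]
  · simp

theorem pvDict_contains {pre : List Int} {b : PySem.Dict Int Int}
    (hb : ∀ c, b.get? c = if pvMult pre c = 0 then none else some ((pvMult pre c : Int))) (c : Int) :
    b.contains c = true ↔ pvMult pre c ≠ 0 := by
  rw [PySem.Dict.contains_eq_isSome_get?, hb]
  split_ifs with h <;> simp [h]

theorem pvDict_memKeys {pre : List Int} {b : PySem.Dict Int Int}
    (hb : ∀ c, b.get? c = if pvMult pre c = 0 then none else some ((pvMult pre c : Int))) (c : Int) :
    c ∈ b.keys ↔ pvMult pre c ≠ 0 := by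
  constructor
  · intro hm h0
    have := (PySem.Dict.get?_eq_none_iff_not_mem_keys b c).1 (by rw [hb]; simp [h0])
    exact this hm
  · intro h0
    by_contra hm
    have := (PySem.Dict.get?_eq_none_iff_not_mem_keys b c).2 hm
    rw [hb] at this
    simp [h0] at this

-- the b-dict update of one iteration of A, and A's answer update (proof-side names for A's code)
def pvBUpd (b : PySem.Dict Int Int) (curr : Int) : PySem.Dict Int Int :=
  let b :=
    if curr ≠ 0 then
      let b := b.insert curr (b.getD curr 0 - 1)
      if b.getD curr 0 = 0 then b.erase curr else b
    else b
  b.insert (curr + 1) (b.getD (curr + 1) 0 + 1)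

def pvAnsA (a b : PySem.Dict Int Int) (x i ans : Int) : Int :=
  if a.getD x 0 = i + 1 ∨ (b.contains 1 ∧ b.getD 1 0 = i + 1) then max ans (i + 1)
  else if b.size = 2 then
    let p := PySem.List.pyGetD b.keys 0 0
    let q := PySem.List.pyGetD b.keys 1 0
    let count1 := b.getD p 0
    let count2 := b.getD q 0
    let ans :=
      if q - p = 1 ∧ count2 = 1 then max ans (i + 1)
      else if p - q = 1 ∧ count1 = 1 then max ans (i + 1)
      else ans
    if (q = 1 ∧ count2 = 1) ∨ (p = 1 ∧ count1 = 1) then max ans (i + 1) else ans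
  else ans

theorem pvStepA_eq (arr : List Int) (a b : PySem.Dict Int Int) (ans i : Int) :
    pvStepA arr (a, b, ans) i =
      (a.insert (PySem.List.pyGetD arr i 0) (a.getD (PySem.List.pyGetD arr i 0) 0 + 1),
       pvBUpd b (if a.contains (PySem.List.pyGetD arr i 0) then a.getD (PySem.List.pyGetD arr i 0) 0 else 0),
       pvAnsA (a.insert (PySem.List.pyGetD arr i 0) (a.getD (PySem.List.pyGetD arr i 0) 0 + 1))
         (pvBUpd b (if a.contains (PySem.List.pyGetD arr i 0) then a.getD (PySem.List.pyGetD arr i 0) 0 else 0))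
         (PySem.List.pyGetD arr i 0) i ans) := rfl

-- maintenance of the frequency-of-frequency dict across one appended element
theorem pvBUpd_inv (pre : List Int) (x : Int) (b : PySem.Dict Int Int)
    (hb : ∀ c, b.get? c = if pvMult pre c = 0 then none else some ((pvMult pre c : Int)))
    (hbN : b.keys.Nodup) :
    (∀ c, (pvBUpd b ((pre.count x : Int))).get? c =
        if pvMult (pre ++ [x]) c = 0 then none else some ((pvMult (pre ++ [x]) c : Int))) ∧
    (pvBUpd b ((pre.count x : Int))).keys.Nodup := by
  have hgD := pvDict_getD hb
  have hM3 := pvMult_append_succ pre x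
  have hMo := pvMult_append_other pre x
  by_cases hx : x ∈ pre
  · have hk0 : (pre.count x : Int) ≠ 0 := by
      have := List.count_pos_iff.2 hx
      omega
    have hmk : pvMult pre ((pre.count x : Int)) ≠ 0 := pvMult_count_ne_zero hx
    have hM2 := pvMult_append_curr pre x hx
    unfold pvBUpd
    rw [if_pos hk0]
    have hb1get : ∀ c, (b.insert ((pre.count x : Int)) (b.getD ((pre.count x : Int)) 0 - 1)).get? c =
        if c = ((pre.count x : Int)) then some ((pvMult pre ((pre.count x : Int)) : Int) - 1)
        else b.get? c := by
      intro c
      rw [PySem.Dict.get?_insert, hgD]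
    have hb1gD : (b.insert ((pre.count x : Int)) (b.getD ((pre.count x : Int)) 0 - 1)).getD
        ((pre.count x : Int)) 0 = (pvMult pre ((pre.count x : Int)) : Int) - 1 := by
      rw [PySem.Dict.getD_eq_get?_getD, hb1get, if_pos rfl, Option.getD_some]
    by_cases h1 : (pvMult pre ((pre.count x : Int)) : Int) - 1 = 0
    · rw [if_pos (by rw [hb1gD]; exact h1)]
      have hb2get : ∀ c, ((b.insert ((pre.count x : Int)) (b.getD ((pre.count x : Int)) 0 - 1)).erase
          ((pre.count x : Int))).get? c = if c = ((pre.count x : Int)) then none else b.get? c := by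
        intro c
        rw [pvGet?_erase, hb1get]
        by_cases hck : c = ((pre.count x : Int)) <;> simp [hck]
      have hb2gD : ((b.insert ((pre.count x : Int)) (b.getD ((pre.count x : Int)) 0 - 1)).erase
          ((pre.count x : Int))).getD ((pre.count x : Int) + 1) 0 = (pvMult pre ((pre.count x : Int) + 1) : Int) := by
        rw [PySem.Dict.getD_eq_get?_getD, hb2get, if_neg (by omega), hb]
        split_ifs with h2 <;> simp [h2]
      constructor
      · intro c
        rw [PySem.Dict.get?_insert, hb2gD]
        by_cases hc1 : c = (pre.count x : Int) + 1
        · subst hc1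
          rw [if_pos rfl, if_neg (by omega : ¬ pvMult (pre ++ [x]) ((pre.count x : Int) + 1) = 0)]
          rw [hM3]
          simp only [Option.some.injEq]
          push_cast
          omega
        · rw [if_neg hc1, hb2get]
          by_cases hc2 : c = (pre.count x : Int)
          · subst hc2
            rw [if_pos rfl, if_pos (by omega : pvMult (pre ++ [x]) ((pre.count x : Int)) = 0)]
          · rw [if_neg hc2, hb, hMo c hc2 hc1]
      · apply PySem.Dict.nodup_keys_insert
        rw [pvKeys_erase]
        exact (PySem.Dict.nodup_keys_insert _ _ _ hbN).filter _
    · rw [if_neg (by rw [hb1gD]; exact h1)]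
      have hb1gD2 : (b.insert ((pre.count x : Int)) (b.getD ((pre.count x : Int)) 0 - 1)).getD
          ((pre.count x : Int) + 1) 0 = (pvMult pre ((pre.count x : Int) + 1) : Int) := by
        rw [PySem.Dict.getD_eq_get?_getD, hb1get, if_neg (by omega), hb]
        split_ifs with h2 <;> simp [h2]
      constructor
      · intro c
        rw [PySem.Dict.get?_insert, hb1gD2]
        by_cases hc1 : c = (pre.count x : Int) + 1
        · subst hc1
          rw [if_pos rfl, if_neg (by omega : ¬ pvMult (pre ++ [x]) ((pre.count x : Int) + 1) = 0)]
          rw [hM3]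
          simp only [Option.some.injEq]
          push_cast
          omega
        · rw [if_neg hc1, hb1get]
          by_cases hc2 : c = (pre.count x : Int)
          · subst hc2
            rw [if_pos rfl, if_neg (by omega : ¬ pvMult (pre ++ [x]) ((pre.count x : Int)) = 0)]
            simp only [Option.some.injEq]
            push_cast
            omega
          · rw [if_neg hc2, hb, hMo c hc2 hc1]
      · exact PySem.Dict.nodup_keys_insert _ _ _ (PySem.Dict.nodup_keys_insert _ _ _ hbN)
  · have hk0 : (pre.count x : Int) = 0 := by
      simp [List.count_eq_zero_of_not_mem hx]
    unfold pvBUpd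
    rw [if_neg (by omega)]
    have hbgD : b.getD ((pre.count x : Int) + 1) 0 = (pvMult pre ((pre.count x : Int) + 1) : Int) :=
      hgD _
    constructor
    · intro c
      rw [PySem.Dict.get?_insert, hbgD]
      by_cases hc1 : c = (pre.count x : Int) + 1
      · subst hc1
        rw [if_pos rfl, if_neg (by omega : ¬ pvMult (pre ++ [x]) ((pre.count x : Int) + 1) = 0)]
        rw [hM3]
        simp only [Option.some.injEq]
        push_cast
        omega
      · rw [if_neg hc1, hb]
        by_cases hc2 : c = (pre.count x : Int)
        · have hz1 : pvMult pre c = 0 := by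
            by_contra hz
            have := pvMult_pos_of_ne_zero hz
            omega
          have hz2 : pvMult (pre ++ [x]) c = 0 := by
            by_contra hz
            have := pvMult_pos_of_ne_zero hz
            omega
          simp [hz1, hz2]
        · rw [hMo c hc2 hc1]
    · exact PySem.Dict.nodup_keys_insert _ _ _ hbN

-- facts about B's recomputed frequency dict
theorem pvFreq_facts (l : List Int) :
    (∀ c, ((l.foldl (fun d x => d.insert x (d.getD x 0 + 1)) (PySem.Dict.empty : PySem.Dict Int Int)).values.foldl
        (fun d c => d.insert c (d.getD c 0 + 1)) (PySem.Dict.empty : PySem.Dict Int Int)).getD c 0 = (pvMult l c : Int)) ∧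
    (∀ c, c ∈ ((l.foldl (fun d x => d.insert x (d.getD x 0 + 1)) (PySem.Dict.empty : PySem.Dict Int Int)).values.foldl
        (fun d c => d.insert c (d.getD c 0 + 1)) (PySem.Dict.empty : PySem.Dict Int Int)).keys ↔ pvMult l c ≠ 0) ∧
    ((l.foldl (fun d x => d.insert x (d.getD x 0 + 1)) (PySem.Dict.empty : PySem.Dict Int Int)).values.foldl
        (fun d c => d.insert c (d.getD c 0 + 1)) (PySem.Dict.empty : PySem.Dict Int Int)).keys.Nodup := by
  set cnt := l.foldl (fun d x => d.insert x (d.getD x 0 + 1)) (PySem.Dict.empty : PySem.Dict Int Int) with hcnt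
  have hcntK : cnt.keys = PySem.Set.ofList l := by
    rw [hcnt, PySem.Dict.keys_foldl_insert]
    simp [PySem.Set.update_nil_left]
  have hcntN : cnt.keys.Nodup := by
    rw [hcntK]; exact PySem.Set.nodup_ofList l
  have hcntD : ∀ v, cnt.getD v 0 = (l.count v : Int) := by
    intro v
    rw [hcnt, PySem.Dict.getD_foldl_insert_add_one]
    simp
  have hV : cnt.values = (PySem.Set.ofList l).map (fun y => (l.count y : Int)) := by
    rw [PySem.Dict.values_eq_map_keys cnt hcntN 0, hcntK]
    exact List.map_congr_left (fun y _ => hcntD y)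
  set freq := cnt.values.foldl (fun d c => d.insert c (d.getD c 0 + 1)) (PySem.Dict.empty : PySem.Dict Int Int) with hfreq
  have hfD : ∀ c, freq.getD c 0 = (pvMult l c : Int) := by
    intro c
    rw [hfreq, PySem.Dict.getD_foldl_insert_add_one, hV]
    unfold pvMult
    simp [List.count, List.countP_map, Function.comp_def]
  have hfK : freq.keys = PySem.Set.ofList cnt.values := by
    rw [hfreq, PySem.Dict.keys_foldl_insert]
    simp [PySem.Set.update_nil_left]
  refine ⟨hfD, ?_, ?_⟩
  · intro c
    rw [hfK, PySem.Set.mem_ofList, hV, List.mem_map, pvMult_ne_zero]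
    constructor
    · rintro ⟨y, hy, hyc⟩
      exact ⟨y, (PySem.Set.mem_ofList l y).1 hy, hyc⟩
    · rintro ⟨y, hy, hyc⟩
      exact ⟨y, (PySem.Set.mem_ofList l y).2 hy, hyc⟩
  · rw [hfK]; exact PySem.Set.nodup_ofList _

-- A's answer update agrees with B's validity test on the sorted frequency keys
theorem pvAns_eq (pre2 : List Int) (x i ans : Int) (hx : x ∈ pre2)
    (hL : (pre2.length : Int) = i + 1)
    (a2 b2 freq : PySem.Dict Int Int) (ks : List Int)
    (ha2 : a2.getD x 0 = (pre2.count x : Int))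
    (hbg : ∀ c, b2.getD c 0 = (pvMult pre2 c : Int))
    (hbm : ∀ c, c ∈ b2.keys ↔ pvMult pre2 c ≠ 0)
    (hbc : ∀ c, b2.contains c = true ↔ pvMult pre2 c ≠ 0)
    (hbN : b2.keys.Nodup)
    (hfq : ∀ c, freq.getD c 0 = (pvMult pre2 c : Int))
    (hks : ∀ c, c ∈ ks ↔ pvMult pre2 c ≠ 0)
    (hksN : ks.Nodup) (hksP : ks.Pairwise (· ≤ ·))
    (hans : ans ≤ i + 1) :
    pvAnsA a2 b2 x i ans =
      (if ks.length = 1 then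
        if PySem.List.pyGetD ks 0 0 = i + 1 ∨ PySem.List.pyGetD ks 0 0 = 1 then i + 1 else ans
      else if ks.length = 2 then
        if (PySem.List.pyGetD ks 1 0 = PySem.List.pyGetD ks 0 0 + 1 ∧ freq.getD (PySem.List.pyGetD ks 1 0) 0 = 1)
            ∨ (PySem.List.pyGetD ks 0 0 = 1 ∧ freq.getD (PySem.List.pyGetD ks 0 0) 0 = 1) then i + 1 else ans
      else ans) := by
  have hLpos : 1 ≤ i + 1 := by
    have := List.length_pos_of_mem hx
    omega
  have hsupx : pvMult pre2 ((pre2.count x : Int)) ≠ 0 := pvMult_count_ne_zero hx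
  have hlen : b2.keys.length = ks.length :=
    ((List.perm_ext_iff_of_nodup hbN hksN).2 (fun c => (hbm c).trans (hks c).symm)).length_eq
  have hC1a : (a2.getD x 0 = i + 1) ↔ pvMult pre2 (i + 1) ≠ 0 := by
    rw [ha2, ← hL]
    exact pvMult_len hx
  have hC1b : (b2.contains 1 = true ∧ b2.getD 1 0 = i + 1) ↔ ((pvMult pre2 1 : Int) = i + 1) := by
    rw [hbc, hbg]
    constructor
    · exact fun h => h.2
    · intro h
      refine ⟨?_, h⟩
      omega
  have hgd0 : ∀ (a : Int) (t : List Int), PySem.List.pyGetD (a :: t) 0 0 = a := by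
    intro a t
    simpa using PySem.List.pyGetD_natCast (a :: t) 0 0
  have hgd1 : ∀ (a b : Int) (t : List Int), PySem.List.pyGetD (a :: b :: t) 1 0 = b := by
    intro a b t
    have h1 : ((1 : Nat) : Int) = (1 : Int) := rfl
    have := PySem.List.pyGetD_natCast (a :: b :: t) 1 0
    rw [h1] at this
    simpa using this
  unfold pvAnsA
  rcases ks with _ | ⟨k1, kt⟩
  · exact absurd ((hks _).2 hsupx) List.not_mem_nil
  rcases kt with _ | ⟨k2, kt2⟩
  · -- exactly one frequency class
    have hk1 : pvMult pre2 k1 ≠ 0 := (hks k1).1 (by simp)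
    have honly : ∀ c, pvMult pre2 c ≠ 0 → c = k1 := by
      intro c hc
      have := (hks c).2 hc
      simpa using this
    have hA1 : (a2.getD x 0 = i + 1) ↔ k1 = i + 1 := by
      rw [hC1a]
      constructor
      · intro h
        exact (honly _ h).symm
      · intro h
        rw [← h]; exact hk1
    have hA2 : (b2.contains 1 = true ∧ b2.getD 1 0 = i + 1) ↔ k1 = 1 := by
      rw [hC1b]
      constructor
      · intro h
        have hne : pvMult pre2 1 ≠ 0 := by omega
        exact (honly _ hne).symm
      · intro h
        have hall : ∀ c, pvMult pre2 c ≠ 0 → c = 1 := fun c hc => (honly c hc).trans h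
        have := pvMult_one_eq_len.2 hall
        omega
    have hsz : b2.size = 1 := by
      rw [pvSize_eq_keys_length, hlen]; rfl
    simp only [hgd0]
    rw [if_pos (show ([k1] : List Int).length = 1 from by simp)]
    by_cases hc : k1 = i + 1 ∨ k1 = 1
    · rw [if_pos (by rw [hA1, hA2]; exact hc), if_pos hc]
      omega
    · rw [if_neg (by rw [hA1, hA2]; exact hc), if_neg hc, if_neg (by omega : ¬ b2.size = 2)]
  rcases kt2 with _ | ⟨k3, kt3⟩
  · -- exactly two frequency classes
    have hk1 : pvMult pre2 k1 ≠ 0 := (hks k1).1 (by simp)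
    have hk2 : pvMult pre2 k2 ≠ 0 := (hks k2).1 (by simp)
    have hne12 : k1 ≠ k2 := by
      rw [List.nodup_cons] at hksN
      intro h
      exact hksN.1 (by simp [h])
    have hle12 : k1 ≤ k2 := by
      rw [List.pairwise_cons] at hksP
      exact hksP.1 k2 (by simp)
    have hlt12 : k1 < k2 := lt_of_le_of_ne hle12 hne12
    have h1le : 1 ≤ k1 := pvMult_pos_of_ne_zero hk1
    have honly : ∀ c, pvMult pre2 c ≠ 0 → c = k1 ∨ c = k2 := by
      intro c hc
      have := (hks c).2 hc
      simpa using this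
    have hA1 : ¬ (a2.getD x 0 = i + 1) := by
      rw [hC1a]
      intro h
      have hu := pvMult_len_unique (l := pre2) (by rw [hL]; exact h)
      have e1 := hu k1 hk1
      have e2 := hu k2 hk2
      rw [hL] at e1 e2
      omega
    have hA2 : ¬ (b2.contains 1 = true ∧ b2.getD 1 0 = i + 1) := by
      rw [hC1b]
      intro h
      have hall := pvMult_one_eq_len.1 (by rw [hL]; exact_mod_cast h)
      have e1 := hall k1 hk1
      have e2 := hall k2 hk2
      omega
    have hsz : b2.size = 2 := by
      rw [pvSize_eq_keys_length, hlen]; rfl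
    obtain ⟨p, q, hpq⟩ : ∃ p q, b2.keys = [p, q] := by
      rcases hbk : b2.keys with _ | ⟨p, _ | ⟨q, _ | ⟨r, t⟩⟩⟩ <;>
        rw [hbk] at hlen <;> simp at hlen
      exact ⟨p, q, rfl⟩
    have hpqne : p ≠ q := by
      rw [hpq, List.nodup_cons] at hbN
      intro h
      exact hbN.1 (by simp [h])
    have hpmem : p = k1 ∨ p = k2 := honly p ((hbm p).1 (by simp [hpq]))
    have hqmem : q = k1 ∨ q = k2 := honly q ((hbm q).1 (by simp [hpq]))
    rw [if_neg (by rw [not_or]; exact ⟨hA1, hA2⟩), if_pos hsz, hpq]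
    simp only [hgd0, hgd1]
    rw [if_neg (show ¬ ([k1, k2] : List Int).length = 1 from by simp),
      if_pos (show ([k1, k2] : List Int).length = 2 from by simp)]
    rw [hbg p, hbg q, hfq k1, hfq k2]
    rcases hpmem with rfl | rfl
    · have hq2 : q = k2 := by tauto
      subst hq2
      split_ifs <;> omega
    · have hq1 : q = k1 := by tauto
      subst hq1
      split_ifs <;> omega
  · -- three or more frequency classes
    have hk1 : pvMult pre2 k1 ≠ 0 := (hks k1).1 (by simp)
    have hk2 : pvMult pre2 k2 ≠ 0 := (hks k2).1 (by simp)
    have hne12 : k1 ≠ k2 := by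
      rw [List.nodup_cons] at hksN
      intro h
      exact hksN.1 (by simp [h])
    have hA1 : ¬ (a2.getD x 0 = i + 1) := by
      rw [hC1a]
      intro h
      have hu := pvMult_len_unique (l := pre2) (by rw [hL]; exact h)
      have e1 := hu k1 hk1
      have e2 := hu k2 hk2
      rw [hL] at e1 e2
      omega
    have hA2 : ¬ (b2.contains 1 = true ∧ b2.getD 1 0 = i + 1) := by
      rw [hC1b]
      intro h
      have hall := pvMult_one_eq_len.1 (by rw [hL]; exact_mod_cast h)
      have e1 := hall k1 hk1
      have e2 := hall k2 hk2
      omega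
    have hsz : ¬ b2.size = 2 := by
      rw [pvSize_eq_keys_length, hlen]
      simp only [List.length_cons]
      omega
    rw [if_neg (by rw [not_or]; exact ⟨hA1, hA2⟩), if_neg hsz,
      if_neg (by simp only [List.length_cons]; omega),
      if_neg (by simp only [List.length_cons]; omega)]

-- one full iteration: invariants are maintained and the two answers stay equal
theorem pvStep (arr : List Int) (n : Nat) (hn : n < arr.length)
    (a b : PySem.Dict Int Int) (ans : Int)
    (hInv : pvInv (arr.take n) a b) (hlo : 1 ≤ ans) (hhi : ans ≤ max 1 (n : Int)) :
    pvInv (arr.take (n + 1)) (pvStepA arr (a, b, ans) (n : Int)).1 (pvStepA arr (a, b, ans) (n : Int)).2.1 ∧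
    (pvStepA arr (a, b, ans) (n : Int)).2.2 = pvStepB arr ans (n : Int) ∧
    1 ≤ (pvStepA arr (a, b, ans) (n : Int)).2.2 ∧
    (pvStepA arr (a, b, ans) (n : Int)).2.2 ≤ max 1 ((n + 1 : Nat) : Int) := by
  obtain ⟨ha, hb, hbN⟩ := hInv
  have hxel : PySem.List.pyGetD arr (n : Int) 0 = arr.getD n 0 := PySem.List.pyGetD_natCast arr n 0
  set x := arr.getD n 0 with hxdef
  set pre := arr.take n with hpredef
  have hx' : x = arr[n] := List.getD_eq_getElem arr 0 hn
  have hpre2 : arr.take (n + 1) = pre ++ [x] := by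
    rw [List.take_succ, List.getElem?_eq_getElem hn, hx', hpredef]
    simp
  have hagD : ∀ y, a.getD y 0 = (pre.count y : Int) := by
    intro y
    rw [PySem.Dict.getD_eq_get?_getD, ha]
    split_ifs with h0
    · simp [h0]
    · simp
  have hacont : ∀ y, a.contains y = true ↔ y ∈ pre := by
    intro y
    by_cases hy : y ∈ pre
    · rw [PySem.Dict.contains_eq_isSome_get?, ha,
        if_neg (by have := List.count_pos_iff.2 hy; omega)]
      simpa using hy
    · rw [PySem.Dict.contains_eq_isSome_get?, ha, if_pos (List.count_eq_zero.2 hy)]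
      simpa using hy
  have hcurr : (if a.contains x then a.getD x 0 else 0) = ((pre.count x : Nat) : Int) := by
    by_cases hc : x ∈ pre
    · rw [if_pos ((hacont x).2 hc), hagD]
    · rw [if_neg (fun hcc => hc ((hacont x).1 hcc)), List.count_eq_zero.2 hc]
      simp
  rw [pvStepA_eq, hxel, hcurr]
  obtain ⟨hb2, hb2N⟩ := pvBUpd_inv pre x b hb hbN
  have hcount2 : ∀ y : Int, (pre ++ [x]).count y = pre.count y + (if x = y then 1 else 0) := by
    intro y
    simp [List.count_append, List.count_singleton]
  have ha2new : ∀ y, (a.insert x (a.getD x 0 + 1)).get? y =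
      if (pre ++ [x]).count y = 0 then none else some (((pre ++ [x]).count y : Int)) := by
    intro y
    rw [PySem.Dict.get?_insert]
    by_cases hyx : y = x
    · subst hyx
      rw [if_pos rfl, hagD, if_neg (by rw [hcount2 x]; simp), hcount2 x]
      simp only [Option.some.injEq]
      push_cast
      omega
    · rw [if_neg hyx, ha y, hcount2 y]
      have hxy0 : (if x = y then 1 else 0) = 0 := if_neg (fun h => hyx h.symm)
      rw [hxy0, Nat.add_zero]
  have ha2gD : (a.insert x (a.getD x 0 + 1)).getD x 0 = (((pre ++ [x]).count x : Nat) : Int) := by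
    rw [PySem.Dict.getD_eq_get?_getD, ha2new x, if_neg (by rw [hcount2 x]; simp)]
    simp
  have hslice : PySem.List.slice arr none (some ((n : Int) + 1)) = pre ++ [x] := by
    have htn : ((n : Int) + 1).toNat = n + 1 := by omega
    rw [PySem.List.slice_to arr (by omega : (0:Int) ≤ (n : Int) + 1), htn, ← hpre2]
  obtain ⟨hfD, hfM, hfN⟩ := pvFreq_facts (pre ++ [x])
  have hxtwo : x ∈ pre ++ [x] := by simp
  have hL : ((pre ++ [x]).length : Int) = (n : Int) + 1 := by
    have hlenp : pre.length = n := by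
      rw [hpredef]
      exact List.length_take_of_le (by omega)
    simp [hlenp]
  have hAns : pvAnsA (a.insert x (a.getD x 0 + 1)) (pvBUpd b ((pre.count x : Int))) x (n : Int) ans =
      pvStepB arr ans (n : Int) := by
    unfold pvStepB
    rw [hslice]
    have hperm := PySem.List.sorted_perm (((pre ++ [x]).foldl (fun d x => d.insert x (d.getD x 0 + 1))
        (PySem.Dict.empty : PySem.Dict Int Int)).values.foldl (fun d c => d.insert c (d.getD c 0 + 1))
        (PySem.Dict.empty : PySem.Dict Int Int)).keys (fun k => k) false
    refine pvAns_eq (pre ++ [x]) x (n : Int) ans hxtwo hL _ _ _ _ ha2gD (pvDict_getD hb2)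
      (pvDict_memKeys hb2) (pvDict_contains hb2) hb2N hfD ?_ ?_ ?_ (by omega)
    · intro c
      rw [hperm.mem_iff]
      exact hfM c
    · exact hperm.nodup_iff.2 hfN
    · exact PySem.List.sorted_pairwise _ _
  refine ⟨?_, hAns, ?_, ?_⟩
  · rw [hpre2]
    exact ⟨ha2new, hb2, hb2N⟩
  · rw [hAns]
    simp only [pvStepB]
    split_ifs <;> omega
  · rw [hAns]
    simp only [pvStepB]
    push_cast
    split_ifs <;> omega

theorem pv_loop (arr : List Int) (n : Nat) (hn : n ≤ arr.length) :
    pvInv (arr.take n)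
        (((List.range n).map (fun k : Nat => (k : Int))).foldl (pvStepA arr) (PySem.Dict.empty, PySem.Dict.empty, 1)).1
        (((List.range n).map (fun k : Nat => (k : Int))).foldl (pvStepA arr) (PySem.Dict.empty, PySem.Dict.empty, 1)).2.1 ∧
      (((List.range n).map (fun k : Nat => (k : Int))).foldl (pvStepA arr) (PySem.Dict.empty, PySem.Dict.empty, 1)).2.2 =
        ((List.range n).map (fun k : Nat => (k : Int))).foldl (pvStepB arr) 1 ∧
      1 ≤ (((List.range n).map (fun k : Nat => (k : Int))).foldl (pvStepA arr) (PySem.Dict.empty, PySem.Dict.empty, 1)).2.2 ∧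
      (((List.range n).map (fun k : Nat => (k : Int))).foldl (pvStepA arr) (PySem.Dict.empty, PySem.Dict.empty, 1)).2.2 ≤ max 1 (n : Int) := by
  induction n with
  | zero =>
    refine ⟨⟨?_, ?_, ?_⟩, ?_, ?_, ?_⟩ <;>
      simp [pvMult, PySem.Dict.get?_empty, PySem.Dict.keys_empty]
  | succ n ih =>
    obtain ⟨hInv, hEq, hlo, hhi⟩ := ih (by omega)
    rw [List.range_succ, List.map_append, List.foldl_append, List.foldl_append]
    simp only [List.map_cons, List.map_nil, List.foldl_cons, List.foldl_nil]
    set st := ((List.range n).map (fun k : Nat => (k : Int))).foldl (pvStepA arr)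
      (PySem.Dict.empty, PySem.Dict.empty, 1) with hst
    have hstep := pvStep arr n (by omega) st.1 st.2.1 st.2.2 hInv hlo hhi
    rw [← hEq]
    exact hstep

-- ===== VERDICT (by name: the statement is the Claim_ definition above) =====
theorem maxPrefixLen_spec : Claim_equal_maxPrefixLen := by
  intro arr N _ hPre
  unfold Spec_maxPrefixLen maxPrefixLen maxPrefixLen_alt
  by_cases hN : N < 0
  · have h0 : PySem.List.pyRange 0 N 1 = [] := by
      simp [PySem.List.pyRange]; omega
    simp [h0]
  · obtain ⟨n, rfl⟩ : ∃ n : Nat, N = (n : Int) := ⟨N.toNat, (Int.toNat_of_nonneg (by omega)).symm⟩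
    unfold Pre_maxPrefixLen at hPre
    have hn : n ≤ arr.length := by exact_mod_cast hPre
    rw [PySem.List.pyRange_zero_natCast]
    exact (pv_loop arr n hn).2.1
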